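-- pv_equiv track=rewrite | github.com/Amir-HB/Kernel-Method-Project | LastVersion.py | spectrum_phi
-- ===== SOURCE A (Python) =====
-- def spectrum_phi(x, l):
--     n = len(x)
--     dic = {}
--     for i in range(0,n-l):
--     	s = x[i:i+l]
--     	if s in dic.keys(): dic.update({s:dic[s]+1})
--     	else: dic.update({s:1})
--     return dic
-- ===== SOURCE B (Python) =====
-- def spectrum_phi(x, l):
--     subs = [x[i:i+l] for i in range(len(x) - l)]
--     return {s: subs.count(s) for s in dict.fromkeys(subs)}
-- ===== Notes on version B (the rewrite author's own statement) =====
-- stated objective: alternative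
-- what changed: B materialises the window list once, ordered-dedups it, and counts each distinct substring with list.count, instead of A's per-window dict membership-and-increment loop.
import Mathlib
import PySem

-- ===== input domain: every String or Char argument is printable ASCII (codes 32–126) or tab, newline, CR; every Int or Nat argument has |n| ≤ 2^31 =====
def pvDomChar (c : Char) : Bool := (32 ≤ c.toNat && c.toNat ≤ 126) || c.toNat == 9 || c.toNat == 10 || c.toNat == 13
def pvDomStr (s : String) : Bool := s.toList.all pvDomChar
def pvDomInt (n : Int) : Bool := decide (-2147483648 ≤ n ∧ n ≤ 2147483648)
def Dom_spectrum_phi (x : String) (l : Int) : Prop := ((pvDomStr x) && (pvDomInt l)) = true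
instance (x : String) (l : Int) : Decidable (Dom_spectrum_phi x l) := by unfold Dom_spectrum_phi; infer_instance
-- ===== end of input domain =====

-- B counts by building the window list once, ordered-deduping it and counting each distinct
-- substring, instead of A's membership-and-increment dict loop (objective: alternative).

-- ===== PORT A =====
def spectrum_phi (x : String) (l : Int) : List (String × Int) :=
  let n : Int := PySem.Str.len x
  let dic : PySem.Dict String Int :=
    (PySem.List.pyRange 0 (n - l) 1).foldl (fun d i =>
      let s := PySem.Str.slice x (some i) (some (i + l))
      match d.get? s with
      | some v => d.insert s (v + 1)
      | none   => d.insert s 1) PySem.Dict.empty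
  dic.items

-- ===== PORT B =====
def spectrum_phi_alt (x : String) (l : Int) : List (String × Int) :=
  let subs : List String :=
    (PySem.List.pyRange 0 (PySem.Str.len x - l) 1).map
      (fun i => PySem.Str.slice x (some i) (some (i + l)))
  (PySem.List.dedup subs).map (fun s => (s, (subs.count s : Int)))

-- ===== PRECONDITION & SPEC =====
def Spec_spectrum_phi (x : String) (l : Int) (out : List (String × Int)) : Prop := out = spectrum_phi_alt x l
instance (x : String) (l : Int) (out : List (String × Int)) : Decidable (Spec_spectrum_phi x l out) := by unfold Spec_spectrum_phi; infer_instance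

-- ===== CLAIM (what is proved, stated in full; the proofs are below) =====
def Claim_equal_spectrum_phi : Prop := ∀ (x : String) (l : Int), Dom_spectrum_phi x l → Spec_spectrum_phi x l (spectrum_phi x l)

-- ===== LEMMAS AND PROOFS =====
theorem step_eq (d : PySem.Dict String Int) (s : String) :
    (match d.get? s with
     | some v => d.insert s (v + 1)
     | none   => d.insert s 1) = d.insert s (d.getD s 0 + 1) := by
  cases h : d.get? s with
  | some v => simp [PySem.Dict.getD, h]
  | none   => simp [PySem.Dict.getD, h]

-- ===== VERDICT (by name: the statement is the Claim_ definition above) =====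
theorem spectrum_phi_spec : Claim_equal_spectrum_phi := by
  intro x l _
  unfold Spec_spectrum_phi spectrum_phi spectrum_phi_alt
  dsimp only
  simp only [step_eq]
  rw [← List.foldl_map (f := fun i => PySem.Str.slice x (some i) (some (i + l)))
        (g := fun (d : PySem.Dict String Int) s => d.insert s (d.getD s 0 + 1))]
  rw [PySem.Dict.foldl_insert_getD_add_one_eq_counter, PySem.Dict.items_counter]
  simp [PySem.List.dedup_eq_ofList]
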